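-- pv_equiv track=rewrite | github.com/shawnerii/Polyalphabetic-Cipher-Encryption | Polyalphabetic Cipher English/brute_force_vigenere.py | word_frequency_check
-- ===== SOURCE A (Python) =====
-- from collections import Counter
--
-- def word_frequency_check(text):
--     common_words = {'an', 'on', 'of', 'to', 'or', 'by', 'the', 'but', 'and'}
--     words = text.lower().split()
--     counter = Counter(words)
--
--     one_letter_words = [word for word in words if len(word) == 1]
--     if any(word not in {'i', 'a'} for word in one_letter_words):
--         return False
--
--     common_word_count = sum(counter[word] for word in common_words)
--     return common_word_count > 8
-- ===== SOURCE B (Python) =====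
-- def word_frequency_check(text):
--     common_words = {'an', 'on', 'of', 'to', 'or', 'by', 'the', 'but', 'and'}
--     common_word_count = 0
--     valid = True
--     for word in text.lower().split():
--         if word in common_words:
--             common_word_count += 1
--         if len(word) == 1 and word not in ('i', 'a'):
--             valid = False
--     if not valid:
--         return False
--     return common_word_count > 8
-- ===== Notes on version B (the rewrite author's own statement) =====
-- stated objective: simpler
-- what changed: Replaces A's three passes (build a Counter, collect one-letter words and test them, sum counts over the fixed common-word set) with one accumulating scan that keeps an integer count and a validity flag.
import Mathlib
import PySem

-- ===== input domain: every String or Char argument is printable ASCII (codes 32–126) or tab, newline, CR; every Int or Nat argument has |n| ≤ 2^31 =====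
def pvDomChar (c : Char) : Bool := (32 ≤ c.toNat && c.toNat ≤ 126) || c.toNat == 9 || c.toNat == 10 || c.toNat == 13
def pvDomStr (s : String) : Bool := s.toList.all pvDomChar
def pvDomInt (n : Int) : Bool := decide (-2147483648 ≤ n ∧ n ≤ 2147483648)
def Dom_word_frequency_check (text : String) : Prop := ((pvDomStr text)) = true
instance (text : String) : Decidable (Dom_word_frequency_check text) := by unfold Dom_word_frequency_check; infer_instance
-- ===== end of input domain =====

-- B replaces A's three passes (Counter, one-letter list + any, sum over the common set)
-- with a single accumulating scan keeping a count and a validity flag (objective: simpler).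

-- the fixed common-word set, shared literal of both programs
def pvCommon : List String := ["an", "on", "of", "to", "or", "by", "the", "but", "and"]

-- ===== PORT A =====
def word_frequency_check (text : String) : Bool :=
  let words := PySem.Str.split₀ (PySem.Str.lower text)
  let counter := PySem.Dict.counter words
  let one_letter_words := words.filter (fun w => PySem.Str.len w == 1)
  if one_letter_words.any (fun w => !(w == "i" || w == "a")) then
    false
  else
    decide ((pvCommon.map (fun w => counter.getD w 0)).sum > 8)

-- ===== PORT B =====
def pvBStep (st : Int × Bool) (w : String) : Int × Bool :=
  let st1 := if pvCommon.contains w then (st.1 + 1, st.2) else st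
  if PySem.Str.len w == 1 && !(w == "i" || w == "a") then (st1.1, false) else st1

def word_frequency_check_alt (text : String) : Bool :=
  let st := (PySem.Str.split₀ (PySem.Str.lower text)).foldl pvBStep (0, true)
  if !st.2 then false else decide (st.1 > 8)

-- ===== PRECONDITION & SPEC =====
def Spec_word_frequency_check (text : String) (out : Bool) : Prop := out = word_frequency_check_alt text
instance (text : String) (out : Bool) : Decidable (Spec_word_frequency_check text out) := by unfold Spec_word_frequency_check; infer_instance

-- ===== CLAIM (what is proved, stated in full; the proofs are below) =====
def Claim_equal_word_frequency_check : Prop := ∀ (text : String), Dom_word_frequency_check text → Spec_word_frequency_check text (word_frequency_check text)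

-- ===== LEMMAS AND PROOFS =====

-- one step of B's fold, in accumulator-free form
theorem pvStep_eq (st : Int × Bool) (x : String) :
    pvBStep st x = (st.1 + (if pvCommon.contains x then 1 else 0),
                    st.2 && !(PySem.Str.len x == 1 && !(x == "i" || x == "a"))) := by
  unfold pvBStep
  cases hc : pvCommon.contains x <;>
    cases hb : (PySem.Str.len x == 1 && !(x == "i" || x == "a")) <;>
      simp only [Bool.false_eq_true, if_false, if_true, Bool.not_false, Bool.not_true,
        Bool.and_true, Bool.and_false, add_zero]

-- B's fold invariant: it counts common words and records whether any bad one-letter word occurred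
theorem pvFold_inv (ws : List String) (c : Int) (v : Bool) :
    ws.foldl pvBStep (c, v)
      = (c + (ws.countP (fun w => pvCommon.contains w) : Int),
         v && !(ws.any (fun w => PySem.Str.len w == 1 && !(w == "i" || w == "a")))) := by
  induction ws generalizing c v with
  | nil => simp
  | cons x ws ih =>
    rw [List.foldl_cons, pvStep_eq, ih]
    simp only [List.countP_cons, List.any_cons, Prod.mk.injEq]
    constructor
    · push_cast; ring
    · cases hb : (PySem.Str.len x == 1 && !(x == "i" || x == "a")) <;> cases v <;> simp

-- counting a disjunction of disjoint predicates splits into a sum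
theorem pvCountP_or {α : Type} (p q : α → Bool) (h : ∀ a, ¬(p a = true ∧ q a = true)) :
    ∀ ws : List α, ws.countP (fun a => p a || q a) = ws.countP p + ws.countP q := by
  intro ws
  induction ws with
  | nil => simp
  | cons x ws ih =>
    simp only [List.countP_cons, ih]
    cases hp : p x <;> cases hq : q x <;> simp_all <;> omega

-- the sum of per-word counts over a duplicate-free key list is the count of hits
theorem pvSum_counts (C : List String) (hC : C.Nodup) (ws : List String) :
    ((C.map (fun w => ((ws.count w : Nat) : Int))).sum)
      = (ws.countP (fun w => C.contains w) : Int) := by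
  induction C with
  | nil => simp
  | cons a C ih =>
    rw [List.nodup_cons] at hC
    simp only [List.map_cons, List.sum_cons, ih hC.2]
    have hsplit : ws.countP (fun w => (a :: C).contains w)
        = ws.countP (fun w => w == a) + ws.countP (fun w => C.contains w) := by
      have hdisj : ∀ w : String, ¬((w == a) = true ∧ C.contains w = true) := by
        intro w ⟨h1, h2⟩
        exact hC.1 (by simpa [eq_of_beq h1] using (List.contains_iff_mem.mp h2))
      calc ws.countP (fun w => (a :: C).contains w)
          = ws.countP (fun w => (w == a) || C.contains w) := by
            simp only [List.contains_cons]
        _ = _ := pvCountP_or _ _ hdisj ws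
    rw [hsplit, List.count]
    push_cast
    ring

-- ===== VERDICT (by name: the statement is the Claim_ definition above) =====
theorem word_frequency_check_spec : Claim_equal_word_frequency_check := by
  intro text _
  unfold Spec_word_frequency_check word_frequency_check word_frequency_check_alt
  simp only [List.any_filter, pvFold_inv, PySem.Dict.getD_counter,
    pvSum_counts pvCommon (by decide) (PySem.Str.split₀ (PySem.Str.lower text))]
  cases h : ((PySem.Str.split₀ (PySem.Str.lower text)).any
      (fun w => PySem.Str.len w == 1 && !(w == "i" || w == "a"))) <;>
    simp
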